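-- pv_equiv track=rewrite | github.com/chris-jpark/BoardGames | sudoku2021.py | squarefind
-- ===== SOURCE A (Python) =====
-- def squarefind(spot: list[int, int]) -> int:
--     squarenum = 0
--     for row in range(3):
--         for column in range(3):
--             if spot[0] >= row * 3 and spot[0] < row * 3 + 3 and spot[1] >= column *3 and spot[1] < column *3 + 3:
--                 return squarenum
--             squarenum += 1
--     return squarenum
-- ===== SOURCE B (Python) =====
-- def squarefind(spot: list) -> int:
--     r = spot[0] // 3
--     c = spot[1] // 3
--     if 0 <= r <= 2 and 0 <= c <= 2:
--         return r * 3 + c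
--     return 9
-- ===== Notes on version B (the rewrite author's own statement) =====
-- stated objective: simpler
-- what changed: Replaces the 9-iteration nested range(3)xrange(3) scan with a constant-time closed form r*3+c using integer division plus a bounds check; Pre_ excludes lists shorter than 2, where A usually raises IndexError but, when spot[0] is out of range, returns 9 only by and-short-circuit never reaching spot[1].
-- outside the precondition, e.g. on squarefind([-2]): A returns 9, B raises IndexError; on squarefind([0]): A raises IndexError, B raises IndexError
import Mathlib
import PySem

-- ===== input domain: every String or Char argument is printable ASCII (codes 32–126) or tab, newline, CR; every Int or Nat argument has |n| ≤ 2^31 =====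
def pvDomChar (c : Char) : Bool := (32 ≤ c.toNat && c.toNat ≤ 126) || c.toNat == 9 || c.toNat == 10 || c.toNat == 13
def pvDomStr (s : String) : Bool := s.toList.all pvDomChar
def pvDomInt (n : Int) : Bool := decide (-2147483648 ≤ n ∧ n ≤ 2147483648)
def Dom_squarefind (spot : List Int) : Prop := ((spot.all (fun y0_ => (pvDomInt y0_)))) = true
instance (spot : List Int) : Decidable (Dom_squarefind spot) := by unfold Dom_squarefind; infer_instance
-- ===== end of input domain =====

-- B replaces A's 9-iteration nested range(3)×range(3) scan with a constant-time
-- closed form r*3+c from integer division, keeping A's value 9 for out-of-range coordinates.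


-- ===== PORT A =====
-- A's nested for-loops with the early 'return squarenum': recursion over the 9 (row, column) pairs
def sqLoopA (s0 s1 : Int) : List (Int × Int) → Int → Int
  | [], n => n
  | (r, c) :: rest, n =>
    if s0 ≥ r * 3 ∧ s0 < r * 3 + 3 ∧ s1 ≥ c * 3 ∧ s1 < c * 3 + 3 then n
    else sqLoopA s0 s1 rest (n + 1)

def squarefind (spot : List Int) : Int :=
  let s0 := (PySem.List.pyGet? spot 0).getD 0   -- exact under Pre_ (length ≥ 2)
  let s1 := (PySem.List.pyGet? spot 1).getD 0
  sqLoopA s0 s1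
    ((PySem.List.pyRange 0 3 1).flatMap (fun r => (PySem.List.pyRange 0 3 1).map (fun c => (r, c)))) 0

-- ===== PORT B =====
def squarefind_alt (spot : List Int) : Int :=
  let r := PySem.Int.floordiv ((PySem.List.pyGet? spot 0).getD 0) 3
  let c := PySem.Int.floordiv ((PySem.List.pyGet? spot 1).getD 0) 3
  if 0 ≤ r ∧ r ≤ 2 ∧ 0 ≤ c ∧ c ≤ 2 then r * 3 + c else 9

-- ===== PRECONDITION & SPEC =====
-- Pre_ excludes lists shorter than 2: there A raises IndexError at spot[0] or spot[1], except that a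
-- 1-element list with spot[0] outside 0..8 returns 9 only because and-short-circuit never reaches spot[1].
def Pre_squarefind (spot : List Int) : Prop := 2 ≤ spot.length
instance (spot : List Int) : Decidable (Pre_squarefind spot) := by unfold Pre_squarefind; infer_instance
def pvWitness_squarefind : List Int := [4, 7]

def Spec_squarefind (spot : List Int) (out : Int) : Prop := out = squarefind_alt spot
instance (spot : List Int) (out : Int) : Decidable (Spec_squarefind spot out) := by unfold Spec_squarefind; infer_instance

-- ===== CLAIM (what is proved, stated in full; the proofs are below) =====
def Claim_equal_squarefind : Prop := ∀ (spot : List Int), Dom_squarefind spot → Pre_squarefind spot → Spec_squarefind spot (squarefind spot)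

-- ===== LEMMAS AND PROOFS =====
theorem sq_core (s0 s1 : Int) :
    sqLoopA s0 s1
      ((PySem.List.pyRange 0 3 1).flatMap (fun r => (PySem.List.pyRange 0 3 1).map (fun c => (r, c)))) 0 =
    (if 0 ≤ PySem.Int.floordiv s0 3 ∧ PySem.Int.floordiv s0 3 ≤ 2 ∧
        0 ≤ PySem.Int.floordiv s1 3 ∧ PySem.Int.floordiv s1 3 ≤ 2
     then PySem.Int.floordiv s0 3 * 3 + PySem.Int.floordiv s1 3 else 9) := by
  have hl : ((PySem.List.pyRange 0 3 1).flatMap (fun r => (PySem.List.pyRange 0 3 1).map (fun c => (r, c))))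
      = [((0:Int),(0:Int)),(0,1),(0,2),(1,0),(1,1),(1,2),(2,0),(2,1),(2,2)] := by decide
  rw [hl]
  rw [PySem.Int.floordiv_eq_ediv_of_pos (a := s0) (by norm_num),
      PySem.Int.floordiv_eq_ediv_of_pos (a := s1) (by norm_num)]
  simp only [sqLoopA]
  split_ifs <;> omega

-- ===== VERDICT (by name: the statement is the Claim_ definition above) =====
theorem squarefind_spec : Claim_equal_squarefind := by
  intro spot _ _
  unfold Spec_squarefind squarefind squarefind_alt
  exact sq_core _ _
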